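-- pv_equiv track=rewrite | github.com/KingdomPy/Pygame-Demos | Space Ships/lib/objects.py | setPath
-- ===== SOURCE A (Python) =====
-- def setPath(path, pathList):
--     if "\\" in path: #Checks if device uses '\' or '/' to navigate folders
--         key = "\\"
--     else:
--         key = "/"
--     path = path.split(key)
--     for i in range(len(pathList)):
--         path.append(pathList[i])
--     path = key.join(path)
--     return path
-- ===== SOURCE B (Python) =====
-- def setPath(path, pathList):
--     key = "\\" if "\\" in path else "/"
--     if not pathList:
--         return path
--     return path + key + key.join(pathList)
-- ===== Notes on version B (the rewrite author's own statement) =====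
-- stated objective: simpler
-- what changed: Uses key.join(path.split(key)) == path to replace the split, the per-element append loop and the rejoin with one closed-form concatenation path + key + key.join(pathList) (path unchanged when pathList is empty).
import Mathlib
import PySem

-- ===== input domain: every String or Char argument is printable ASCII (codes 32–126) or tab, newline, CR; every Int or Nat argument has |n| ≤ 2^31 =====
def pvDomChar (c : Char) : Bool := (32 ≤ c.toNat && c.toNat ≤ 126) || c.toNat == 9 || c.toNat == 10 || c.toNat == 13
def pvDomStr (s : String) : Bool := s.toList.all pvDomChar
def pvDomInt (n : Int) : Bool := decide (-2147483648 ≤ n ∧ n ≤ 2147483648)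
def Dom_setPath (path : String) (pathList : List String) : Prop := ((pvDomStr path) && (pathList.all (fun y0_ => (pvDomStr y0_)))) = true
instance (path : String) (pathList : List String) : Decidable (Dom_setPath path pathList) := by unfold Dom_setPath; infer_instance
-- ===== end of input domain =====

-- B replaces A's split / per-element append loop / rejoin by the closed-form
-- concatenation path + key + key.join(pathList) (path unchanged when pathList is empty);
-- objective: simpler.

-- ===== PORT A =====
def setPath (path : String) (pathList : List String) : String :=
  let key : String := if PySem.Str.isIn "\\" path then "\\" else "/"
  let parts : List String := (PySem.Str.split? path key).getD []  -- key ≠ "" so split? is always some; getD only discharges the Option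
  let parts := pathList.foldl (fun ps x => ps ++ [x]) parts       -- for i in range(len(pathList)): path.append(pathList[i])
  PySem.Str.join key parts

-- ===== PORT B =====
def setPath_alt (path : String) (pathList : List String) : String :=
  let key : String := if PySem.Str.isIn "\\" path then "\\" else "/"
  if pathList.isEmpty then path
  else String.ofList (path.toList ++ key.toList ++ PySem.Chars.join key.toList (pathList.map String.toList))

-- ===== PRECONDITION & SPEC =====
def Spec_setPath (path : String) (pathList : List String) (out : String) : Prop := out = setPath_alt path pathList
instance (path : String) (pathList : List String) (out : String) : Decidable (Spec_setPath path pathList out) := by unfold Spec_setPath; infer_instance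

-- ===== CLAIM (what is proved, stated in full; the proofs are below) =====
def Claim_equal_setPath : Prop := ∀ (path : String) (pathList : List String), Dom_setPath path pathList → Spec_setPath path pathList (setPath path pathList)

-- ===== LEMMAS AND PROOFS =====

theorem pv_foldl_snoc {α : Type} (l acc : List α) :
    l.foldl (fun ps x => ps ++ [x]) acc = acc ++ l := by
  induction l generalizing acc with
  | nil => simp
  | cons x xs ih => simp [List.foldl, ih]

theorem pv_join_cons_ne (sep p : List Char) (qs : List (List Char)) (h : qs ≠ []) :
    PySem.Chars.join sep (p :: qs) = p ++ sep ++ PySem.Chars.join sep qs := by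
  cases qs with
  | nil => exact absurd rfl h
  | cons q rest => exact PySem.Chars.join_cons_cons sep p q rest

theorem pv_join_merge (sep : List Char) (ps : List (List Char)) (x y : List Char) :
    PySem.Chars.join sep (ps ++ [x, y]) = PySem.Chars.join sep (ps ++ [x ++ sep ++ y]) := by
  induction ps with
  | nil =>
    simp [PySem.Chars.join_cons_cons, PySem.Chars.join_singleton]
  | cons p ps ih =>
    rw [List.cons_append, List.cons_append,
      pv_join_cons_ne sep p (ps ++ [x, y]) (by simp),
      pv_join_cons_ne sep p (ps ++ [x ++ sep ++ y]) (by simp), ih]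

theorem pv_go_ne_nil (sep : List Char) (fuel : Nat) (l cur : List Char)
    (acc : List (List Char)) : PySem.Chars.splitOn.go sep fuel l cur acc ≠ [] := by
  induction fuel generalizing l cur acc with
  | zero => simp [PySem.Chars.splitOn.go]
  | succ fuel ih =>
    cases l with
    | nil => simp [PySem.Chars.splitOn.go]
    | cons c rest =>
      rw [PySem.Chars.splitOn.go]
      split_ifs with h
      · exact ih _ _ _
      · exact ih _ _ _

theorem pv_go_join (sep : List Char) (hsep : sep ≠ []) (fuel : Nat) :
    ∀ (l cur : List Char) (acc : List (List Char)), l.length ≤ fuel →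
    PySem.Chars.join sep (PySem.Chars.splitOn.go sep fuel l cur acc)
      = PySem.Chars.join sep (acc.reverse ++ [cur.reverse ++ l]) := by
  induction fuel with
  | zero =>
    intro l cur acc hl
    have : l = [] := List.length_eq_zero_iff.mp (Nat.le_zero.mp hl)
    subst this
    simp [PySem.Chars.splitOn.go]
  | succ fuel ih =>
    intro l cur acc hl
    cases l with
    | nil => simp [PySem.Chars.splitOn.go]
    | cons c rest =>
      rw [PySem.Chars.splitOn.go]
      split_ifs with h
      · obtain ⟨t, ht⟩ := List.isPrefixOf_iff_prefix.mp h
        have hdrop : (c :: rest).drop sep.length = t := by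
          rw [← ht, List.drop_left]
        have hlen : ((c :: rest).drop sep.length).length ≤ fuel := by
          have hsl : 1 ≤ sep.length :=
            Nat.one_le_iff_ne_zero.mpr (by simpa using hsep)
          simp only [List.length_cons] at hl
          rw [List.length_drop]
          simp only [List.length_cons]
          omega
        rw [ih _ _ _ hlen, hdrop]
        have : (cur.reverse :: acc).reverse ++ [List.reverse [] ++ t]
            = acc.reverse ++ [cur.reverse, t] := by simp
        rw [this, pv_join_merge]
        have : cur.reverse ++ sep ++ t = cur.reverse ++ (c :: rest) := by
          rw [← ht]; simp
        simp only [List.append_assoc] at this ⊢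
        rw [show sep ++ t = c :: rest by
          have := ht; simpa using this]
      · have hlen : rest.length ≤ fuel := by
          simpa using Nat.le_of_succ_le_succ (by simpa using hl)
        rw [ih _ _ _ hlen]
        simp

theorem pv_join_splitOn (sep s : List Char) (hsep : sep ≠ []) :
    PySem.Chars.join sep (PySem.Chars.splitOn s sep) = s := by
  unfold PySem.Chars.splitOn
  rw [pv_go_join sep hsep (s.length + 1) s [] [] (Nat.le_succ _)]
  simp [PySem.Chars.join_singleton]

theorem pv_splitOn_ne_nil (s sep : List Char) : PySem.Chars.splitOn s sep ≠ [] := by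
  unfold PySem.Chars.splitOn; exact pv_go_ne_nil _ _ _ _ _

theorem pv_join_append (sep : List Char) (xs ys : List (List Char))
    (hxs : xs ≠ []) (hys : ys ≠ []) :
    PySem.Chars.join sep (xs ++ ys)
      = PySem.Chars.join sep xs ++ sep ++ PySem.Chars.join sep ys := by
  induction xs with
  | nil => exact absurd rfl hxs
  | cons x xs ih =>
    cases xs with
    | nil =>
      rw [List.singleton_append, pv_join_cons_ne sep x ys hys,
        PySem.Chars.join_singleton]
    | cons x' xs' =>
      rw [List.cons_append,
        pv_join_cons_ne sep x ((x' :: xs') ++ ys) (by simp),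
        ih (by simp), PySem.Chars.join_cons_cons]
      simp [List.append_assoc]

theorem pv_key_ne (path : String) :
    ((if PySem.Str.isIn "\\" path then ("\\" : String) else "/")).toList ≠ [] := by
  split_ifs <;> decide

-- the core equality, stated for a fixed key string
theorem pv_main (path : String) (pathList : List String) :
    setPath path pathList = setPath_alt path pathList := by
  unfold setPath setPath_alt
  set key : String := if PySem.Str.isIn "\\" path then "\\" else "/" with hkey
  have hk : key.toList ≠ [] := pv_key_ne path
  have hsplit : PySem.Str.split? path key
      = some ((PySem.Chars.splitOn path.toList key.toList).map String.ofList) := by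
    unfold PySem.Str.split? PySem.Chars.split?
    simp [List.isEmpty_iff, hk]
  simp only [hsplit, Option.getD_some, pv_foldl_snoc]
  unfold PySem.Str.join
  rw [List.map_append, List.map_map]
  have hmap : ((PySem.Chars.splitOn path.toList key.toList).map
      (String.toList ∘ String.ofList)) = PySem.Chars.splitOn path.toList key.toList := by
    simp [Function.comp_def]
  rw [hmap]
  cases pathList with
  | nil =>
    simp [pv_join_splitOn key.toList path.toList hk]
  | cons p ps =>
    rw [pv_join_append key.toList _ _ (pv_splitOn_ne_nil _ _) (by simp),
      pv_join_splitOn key.toList path.toList hk]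
    simp

-- ===== VERDICT (by name: the statement is the Claim_ definition above) =====
theorem setPath_spec : Claim_equal_setPath := by
  intro path pathList _
  unfold Spec_setPath
  exact pv_main path pathList
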